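-- pv_equiv track=rewrite | github.com/cgtrai/amiagi | src/amiagi/application/context_compressor.py | _compress_heuristic
-- ===== SOURCE A (Python) =====
-- def _compress_heuristic(
--     messages: list[dict[str, str]],
--     char_budget: int,
-- ) -> list[dict[str, str]]:
--     """Keep first message, system messages, and as many recent messages as fit."""
--     if not messages:
--         return []
--
--     result: list[dict[str, str]] = []
--     used = 0
--
--     # Always keep the first (system) message
--     first = messages[0]
--     first_len = len(first.get("content", ""))
--     result.append(first)
--     used += first_len
--
--     # Collect remaining messages from newest to oldest
--     remaining = messages[1:]
--     tail: list[dict[str, str]] = []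
--     for msg in reversed(remaining):
--         msg_len = len(msg.get("content", ""))
--         if used + msg_len <= char_budget:
--             tail.append(msg)
--             used += msg_len
--         else:
--             break
--
--     tail.reverse()
--
--     if len(tail) < len(remaining):
--         result.append({
--             "role": "system",
--             "content": f"[{len(remaining) - len(tail)} earlier messages compressed]",
--         })
--
--     result.extend(tail)
--     return result
-- ===== SOURCE B (Python) =====
-- def _compress_heuristic(
--     messages: list[dict[str, str]],
--     char_budget: int,
-- ) -> list[dict[str, str]]:
--     """Keep first message plus the newest messages fitting the char budget."""
--     if not messages:
--         return []
--
--     first = messages[0]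
--     # Cumulative content lengths over the remaining messages, newest first,
--     # offset by the first message's length.
--     total = len(first.get("content", ""))
--     cums = []
--     for msg in reversed(messages[1:]):
--         total += len(msg.get("content", ""))
--         cums.append(total)
--
--     # Lengths are non-negative, so cums is non-decreasing: the number of
--     # entries within budget is exactly the greedy newest-to-oldest cutoff.
--     count = sum(1 for c in cums if c <= char_budget)
--     dropped = len(messages) - 1 - count
--
--     result = [first]
--     if dropped > 0:
--         result.append({
--             "role": "system",
--             "content": f"[{dropped} earlier messages compressed]",
--         })
--     result.extend(messages[len(messages) - count:])
--     return result
-- ===== Notes on version B (the rewrite author's own statement) =====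
-- stated objective: alternative
-- what changed: Replaces the greedy newest-to-oldest accumulation loop with an early break (building a reversed tail that is reversed back) by a cumulative-length table whose within-budget count is taken directly, the kept tail then being a single slice of the original list in chronological order.
import Mathlib
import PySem

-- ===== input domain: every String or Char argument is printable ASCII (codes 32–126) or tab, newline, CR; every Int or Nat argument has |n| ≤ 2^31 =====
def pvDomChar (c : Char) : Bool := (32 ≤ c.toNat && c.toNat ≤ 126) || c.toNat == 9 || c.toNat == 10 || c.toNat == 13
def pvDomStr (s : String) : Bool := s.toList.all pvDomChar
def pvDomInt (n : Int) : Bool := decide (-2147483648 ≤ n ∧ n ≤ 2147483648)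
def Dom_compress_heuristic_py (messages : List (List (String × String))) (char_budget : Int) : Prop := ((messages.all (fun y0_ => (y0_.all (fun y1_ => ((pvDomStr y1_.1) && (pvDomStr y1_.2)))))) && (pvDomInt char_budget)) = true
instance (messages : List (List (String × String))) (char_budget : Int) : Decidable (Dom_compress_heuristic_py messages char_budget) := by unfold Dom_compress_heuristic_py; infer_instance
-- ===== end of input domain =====

-- B replaces A's greedy early-break loop (reversed tail built and re-reversed) by a
-- cumulative-length table: count the within-budget cumulative sums, then slice the
-- original list once; same O(n) cost, different decomposition (objective: alternative).


-- m.get("content", ""): first-match association-list lookup with default (shared by both ports)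
def pvContent (m : List (String × String)) : String :=
  match m.find? (fun p => p.1 == "content") with
  | some p => p.2
  | none => ""

-- ===== PORT A =====
-- the 'for msg in reversed(remaining): … else: break' loop, carrying 'used'
def pvTailLoop (char_budget : Int) (used : Int) : List (List (String × String)) → List (List (String × String))
  | [] => []
  | msg :: rest =>
    let msg_len := PySem.Str.len (pvContent msg)
    if used + msg_len ≤ char_budget then
      msg :: pvTailLoop char_budget (used + msg_len) rest
    else
      []

def compress_heuristic_py (messages : List (List (String × String))) (char_budget : Int) : List (List (String × String)) :=
  match messages with
  | [] => []
  | first :: remaining =>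
    let first_len := PySem.Str.len (pvContent first)
    let tail := (pvTailLoop char_budget first_len remaining.reverse).reverse
    let result :=
      if tail.length < remaining.length then
        [first,
         [("role", "system"),
          ("content", "[" ++ PySem.Int.toStr ((remaining.length : Int) - (tail.length : Int)) ++ " earlier messages compressed]")]]
      else [first]
    result ++ tail

-- ===== PORT B =====
-- the 'for msg in reversed(messages[1:]): total += …; cums.append(total)' loop
def pvCums (total : Int) : List (List (String × String)) → List Int
  | [] => []
  | msg :: rest =>
    let t := total + PySem.Str.len (pvContent msg)
    t :: pvCums t rest

def compress_heuristic_py_alt (messages : List (List (String × String))) (char_budget : Int) : List (List (String × String)) :=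
  match messages with
  | [] => []
  | first :: rest =>
    let cums := pvCums (PySem.Str.len (pvContent first)) rest.reverse
    let count := cums.countP (fun c => decide (c ≤ char_budget))
    let dropped : Int := (messages.length : Int) - 1 - (count : Int)
    let result :=
      if 0 < dropped then
        [first,
         [("role", "system"),
          ("content", "[" ++ PySem.Int.toStr dropped ++ " earlier messages compressed]")]]
      else [first]
    result ++ PySem.List.slice messages (some ((messages.length : Int) - (count : Int))) none

-- ===== PRECONDITION & SPEC =====
def Spec_compress_heuristic_py (messages : List (List (String × String))) (char_budget : Int) (out : List (List (String × String))) : Prop := out = compress_heuristic_py_alt messages char_budget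
instance (messages : List (List (String × String))) (char_budget : Int) (out : List (List (String × String))) : Decidable (Spec_compress_heuristic_py messages char_budget out) := by unfold Spec_compress_heuristic_py; infer_instance

-- ===== CLAIM (what is proved, stated in full; the proofs are below) =====
def Claim_equal_compress_heuristic_py : Prop := ∀ (messages : List (List (String × String))) (char_budget : Int), Dom_compress_heuristic_py messages char_budget → Spec_compress_heuristic_py messages char_budget (compress_heuristic_py messages char_budget)

-- ===== LEMMAS AND PROOFS =====

-- every cumulative sum is at least the starting total (content lengths are ≥ 0)
theorem pvCums_lower (total : Int) (l : List (List (String × String))) :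
    ∀ c ∈ pvCums total l, total ≤ c := by
  induction l generalizing total with
  | nil => intro c hc; simp [pvCums] at hc
  | cons m rest ih =>
    intro c hc
    simp only [pvCums, List.mem_cons] at hc
    have hlen : 0 ≤ PySem.Str.len (pvContent m) := by
      rw [PySem.Str.len_eq]; positivity
    rcases hc with h | h
    · omega
    · have := ih (total + PySem.Str.len (pvContent m)) c h
      omega

theorem pvCums_length (total : Int) (l : List (List (String × String))) :
    (pvCums total l).length = l.length := by
  induction l generalizing total with
  | nil => rfl
  | cons m rest ih => simp [pvCums, ih]

-- A's greedy loop is the prefix of length 'count of within-budget cumulative sums'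
theorem pvTailLoop_eq_take (b : Int) (total : Int) (l : List (List (String × String))) :
    pvTailLoop b total l = l.take ((pvCums total l).countP (fun c => decide (c ≤ b))) := by
  induction l generalizing total with
  | nil => rfl
  | cons m rest ih =>
    by_cases h : total + PySem.Str.len (pvContent m) ≤ b
    · simp only [pvTailLoop, pvCums, List.countP_cons, h, if_pos, decide_true, ih]
      rfl
    · have hz : (pvCums (total + PySem.Str.len (pvContent m)) rest).countP (fun c => decide (c ≤ b)) = 0 := by
        rw [List.countP_eq_zero]
        intro c hc
        have := pvCums_lower _ _ c hc
        simp only [decide_eq_true_eq]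
        omega
      simp only [pvTailLoop, pvCums, List.countP_cons, h, decide_false, hz]
      simp

-- ===== VERDICT (by name: the statement is the Claim_ definition above) =====
theorem compress_heuristic_py_spec : Claim_equal_compress_heuristic_py := by
  intro messages char_budget _
  unfold Spec_compress_heuristic_py
  match messages with
  | [] => rfl
  | first :: rest =>
    simp only [compress_heuristic_py, compress_heuristic_py_alt]
    set count := (pvCums (PySem.Str.len (pvContent first)) rest.reverse).countP
        (fun c => decide (c ≤ char_budget)) with hcount
    have hcle : count ≤ rest.length := by
      have := List.countP_le_length (p := fun c => decide (c ≤ char_budget))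
        (l := pvCums (PySem.Str.len (pvContent first)) rest.reverse)
      rw [pvCums_length, List.length_reverse] at this
      exact this
    -- the tail A keeps is exactly B's slice
    have htail : (pvTailLoop char_budget (PySem.Str.len (pvContent first)) rest.reverse).reverse
        = PySem.List.slice (first :: rest) (some (((first :: rest).length : Int) - (count : Int))) none := by
      rw [pvTailLoop_eq_take, ← hcount, List.take_reverse, List.reverse_reverse,
        PySem.List.slice_some_none]
      have hidx : (((first :: rest).length : Int) - (count : Int))
          = (((first :: rest).length - count : Nat) : Int) := by
        simp only [List.length_cons]; omega
      rw [hidx, PySem.List.clampIdx_natCast]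
      have : min ((first :: rest).length - count) (first :: rest).length
          = (first :: rest).length - count := by omega
      rw [this]
      simp only [List.length_cons]
      have : rest.length + 1 - count = (rest.length - count) + 1 := by omega
      rw [this, List.drop_succ_cons]
    have hlen : (pvTailLoop char_budget (PySem.Str.len (pvContent first)) rest.reverse).reverse.length
        = count := by
      rw [pvTailLoop_eq_take, ← hcount, List.length_reverse, List.length_take,
        List.length_reverse]
      omega
    have hlen' : (PySem.List.slice (first :: rest) (some (((first :: rest).length : Int) - (count : Int))) none).length = count := htail ▸ hlen
    rw [htail, hlen']
    have hcond : count < rest.length ↔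
        (0:Int) < ((first :: rest).length : Int) - 1 - (count : Int) := by
      simp only [List.length_cons]; omega
    by_cases h : count < rest.length
    · rw [if_pos h, if_pos (hcond.mp h)]
      have : ((rest.length : Int) - (count : Int))
          = ((first :: rest).length : Int) - 1 - (count : Int) := by
        simp only [List.length_cons]; push_cast; ring
      rw [this]
    · rw [if_neg h, if_neg (fun hh => h (hcond.mpr hh))]
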